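-- pv_equiv track=rewrite | github.com/AMMAR839/Pendulum_Gazebo | lib_gui_graph.py | _safe_median_diff
-- ===== SOURCE A (Python) =====
-- def _safe_median_diff(xs):
-- 	if xs is None or len(xs) < 3:
-- 		return None
-- 	d = [xs[i] - xs[i - 1] for i in range(1, len(xs))]
-- 	d = [v for v in d if v is not None]
-- 	if not d:
-- 		return None
-- 	return sorted(d)[len(d) // 2]
-- ===== SOURCE B (Python) =====
-- def _safe_median_diff(xs):
--     # Quickselect for the len//2-th order statistic instead of sorting all diffs.
--     if xs is None or len(xs) < 3:
--         return None
--     d = [b - a for a, b in zip(xs, xs[1:])]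
--     k = len(d) // 2
--     while True:
--         p = d[len(d) // 2]
--         lt = [v for v in d if v < p]
--         gt = [v for v in d if v > p]
--         eq_n = len(d) - len(lt) - len(gt)
--         if k < len(lt):
--             d = lt
--         elif k < len(lt) + eq_n:
--             return p
--         else:
--             k -= len(lt) + eq_n
--             d = gt
-- ===== Notes on version B (the rewrite author's own statement) =====
-- stated objective: alternative
-- what changed: Replaces full sorting of the difference list with a middle-pivot quickselect that partitions around a pivot and recurses into the side containing the len//2-th order statistic.
import Mathlib
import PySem

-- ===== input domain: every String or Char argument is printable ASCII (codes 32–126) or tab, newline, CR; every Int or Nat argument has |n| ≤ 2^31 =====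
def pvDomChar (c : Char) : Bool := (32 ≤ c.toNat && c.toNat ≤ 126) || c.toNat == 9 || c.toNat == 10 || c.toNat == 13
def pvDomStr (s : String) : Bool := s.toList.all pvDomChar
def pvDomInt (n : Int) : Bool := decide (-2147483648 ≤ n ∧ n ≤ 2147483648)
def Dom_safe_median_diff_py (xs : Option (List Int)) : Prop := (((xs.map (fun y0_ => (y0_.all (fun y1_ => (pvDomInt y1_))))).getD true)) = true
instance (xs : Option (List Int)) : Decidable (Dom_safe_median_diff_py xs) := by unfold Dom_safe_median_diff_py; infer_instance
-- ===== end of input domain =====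

-- B replaces the full sort of the difference list by a middle-pivot quickselect
-- for the len//2-th order statistic (an alternative algorithm, same exact value).

-- ===== PORT A =====
def safe_median_diff_py (xs : Option (List Int)) : Option Int :=
  match xs with
  | none => none
  | some l =>
    if l.length < 3 then none
    else
      -- d = [xs[i] - xs[i-1] for i in range(1, len(xs))]
      let d := (PySem.List.pyRange 1 (l.length : Int) 1).map
        (fun i => PySem.List.pyGetD l i 0 - PySem.List.pyGetD l (i - 1) 0)
      -- d = [v for v in d if v is not None]  ('v is not None' is always true on ints)
      let d := d.filter (fun _ => true)
      if d = [] then none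
      else
        PySem.List.pyGet? (PySem.List.sorted d (fun v => v) false)
          (PySem.Int.floordiv (d.length : Int) 2)

-- ===== PORT B =====
-- quickselect loop of Source B: pivot = d[len(d)//2], partition, recurse into one side
lemma pv_filter_pivot_lt {p : Int} {f : Int → Bool} (x : Int) (t : List Int)
    (hp : p ∈ x :: t) (hf : f p = false) :
    ((x :: t).filter f).length < (x :: t).length := by
  exact List.length_filter_lt_length_iff_exists.2 ⟨p, hp, by simp [hf]⟩

lemma pv_pivot_mem (x : Int) (t : List Int) :
    (x :: t).getD ((x :: t).length / 2) 0 ∈ x :: t := by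
  rw [List.getD_eq_getElem _ _ (by simp; omega)]
  exact List.getElem_mem _

def qselect : List Int → Nat → Int
  | [], _ => 0
  | x :: t, k =>
    let p := (x :: t).getD ((x :: t).length / 2) 0
    let lt := (x :: t).filter (fun v => decide (v < p))
    let gt := (x :: t).filter (fun v => decide (p < v))
    let eqn := (x :: t).length - lt.length - gt.length
    if k < lt.length then qselect lt k
    else if k < lt.length + eqn then p
    else qselect gt (k - (lt.length + eqn))
  termination_by d _ => d.length
  decreasing_by
  · exact pv_filter_pivot_lt x t (pv_pivot_mem x t) (by simp)
  · exact pv_filter_pivot_lt x t (pv_pivot_mem x t) (by simp)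

def safe_median_diff_py_alt (xs : Option (List Int)) : Option Int :=
  match xs with
  | none => none
  | some l =>
    if l.length < 3 then none
    else
      -- d = [b - a for a, b in zip(xs, xs[1:])]
      let d := (l.zip (PySem.List.slice l (some 1) none)).map (fun ab => ab.2 - ab.1)
      some (qselect d (d.length / 2))

-- ===== PRECONDITION & SPEC =====
def Spec_safe_median_diff_py (xs : Option (List Int)) (out : Option Int) : Prop := out = safe_median_diff_py_alt xs
instance (xs : Option (List Int)) (out : Option Int) : Decidable (Spec_safe_median_diff_py xs out) := by unfold Spec_safe_median_diff_py; infer_instance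

-- ===== CLAIM (what is proved, stated in full; the proofs are below) =====
def Claim_equal_safe_median_diff_py : Prop := ∀ (xs : Option (List Int)), Dom_safe_median_diff_py xs → Spec_safe_median_diff_py xs (safe_median_diff_py xs)

-- ===== LEMMAS AND PROOFS =====

-- the two comprehensions build the same difference list
lemma pv_diff_lists (l : List Int) :
    (PySem.List.pyRange 1 (l.length : Int) 1).map
        (fun i => PySem.List.pyGetD l i 0 - PySem.List.pyGetD l (i - 1) 0)
      = (l.zip (PySem.List.slice l (some 1) none)).map (fun ab => ab.2 - ab.1) := by
  rw [PySem.List.slice_from_one]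
  apply List.ext_getElem
  · simp [PySem.List.length_pyRange_one, List.length_tail]
  · intro i h1 h2
    have h1' : i < (PySem.List.pyRange 1 (l.length : Int) 1).length := by simpa using h1
    have hi : i + 1 < l.length := by
      simp [PySem.List.length_pyRange_one] at h1'; omega
    simp only [List.getElem_map, List.getElem_zip]
    rw [PySem.List.getElem_pyRange_one 1 (l.length : Int) i h1']
    rw [show (1 : Int) + (i : Int) = ((i + 1 : Nat) : Int) by push_cast; ring]
    rw [show ((i + 1 : Nat) : Int) - 1 = ((i : Nat) : Int) by push_cast; ring]
    rw [PySem.List.pyGetD_natCast, PySem.List.pyGetD_natCast]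
    rw [List.getD_eq_getElem _ _ hi, List.getD_eq_getElem _ _ (by omega)]
    rw [List.getElem_tail]

-- a filter whose test rejects a counts no copies of a
lemma pv_count_filter_eq_zero (l : List Int) (p : Int → Bool) (a : Int) (h : p a = false) :
    (l.filter p).count a = 0 := by
  rw [List.count_eq_zero]
  intro hm
  have hpa := (List.mem_filter.1 hm).2
  rw [h] at hpa
  exact Bool.noConfusion hpa

-- the three-way partition is a permutation of the list
lemma pv_partition_perm (d : List Int) (p : Int) :
    (d.filter (fun v => decide (v < p)) ++ List.replicate (d.count p) p
      ++ d.filter (fun v => decide (p < v))).Perm d := by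
  rw [List.perm_iff_count]
  intro a
  simp only [List.count_append, List.count_replicate]
  rcases lt_trichotomy a p with h | h | h
  · rw [List.count_filter (by simp [h])]
    rw [pv_count_filter_eq_zero d _ a (by simp; omega)]
    simp [show ¬ p = a by omega]
  · subst h
    rw [pv_count_filter_eq_zero d _ a (by simp)]
    rw [pv_count_filter_eq_zero d _ a (by simp)]
    simp
  · rw [pv_count_filter_eq_zero d _ a (by simp; omega)]
    rw [List.count_filter (by simp [h])]
    simp [show ¬ p = a by omega]

-- sorted d is: sorted lt, then the copies of the pivot, then sorted gt
lemma pv_sorted_split (d : List Int) (p : Int) :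
    PySem.List.sorted d (fun v => v) false
      = PySem.List.sorted (d.filter (fun v => decide (v < p))) (fun v => v) false
        ++ List.replicate (d.count p) p
        ++ PySem.List.sorted (d.filter (fun v => decide (p < v))) (fun v => v) false := by
  apply PySem.List.sorted_id_eq_of_perm_of_pairwise
  · exact (((PySem.List.sorted_perm _ _ _).append
      (List.Perm.refl _)).append (PySem.List.sorted_perm _ _ _)).trans
        (pv_partition_perm d p)
  · have hlt : ∀ v ∈ PySem.List.sorted (d.filter (fun v => decide (v < p))) (fun v => v) false,
        v < p := by
      intro v hv
      have := (List.mem_filter.1 ((PySem.List.mem_sorted _ _ _ _).1 hv)).2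
      simpa using this
    have hgt : ∀ v ∈ PySem.List.sorted (d.filter (fun v => decide (p < v))) (fun v => v) false,
        p < v := by
      intro v hv
      have := (List.mem_filter.1 ((PySem.List.mem_sorted _ _ _ _).1 hv)).2
      simpa using this
    rw [List.pairwise_append, List.pairwise_append]
    refine ⟨⟨PySem.List.sorted_pairwise _ _,
      List.pairwise_replicate.2 (Or.inr le_rfl), ?_⟩,
      PySem.List.sorted_pairwise _ _, ?_⟩
    · intro a ha b hb
      exact le_of_lt ((List.eq_of_mem_replicate hb) ▸ hlt a ha)
    · intro a ha b hb
      rcases List.mem_append.1 ha with ha | ha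
      · exact le_of_lt ((hlt a ha).trans (hgt b hb))
      · exact le_of_lt ((List.eq_of_mem_replicate ha) ▸ hgt b hb)

-- the partition sizes add up to the length of the list
lemma pv_partition_len (d : List Int) (p : Int) :
    (d.filter (fun v => decide (v < p))).length + d.count p
      + (d.filter (fun v => decide (p < v))).length = d.length := by
  have h := (pv_partition_perm d p).length_eq
  simp [List.length_append, List.length_replicate] at h
  omega

-- quickselect computes the k-th element of the sorted list
lemma pv_qselect_sorted_aux : ∀ (n : Nat) (d : List Int), d.length ≤ n → ∀ k, k < d.length →
    qselect d k = (PySem.List.sorted d (fun v => v) false).getD k 0 := by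
  intro n
  induction n with
  | zero => intro d hd k hk; omega
  | succ n ih =>
    intro d hd k hk
    match d with
    | [] => simp at hk
    | x :: t =>
      rw [qselect]
      generalize hP : (x :: t).getD ((x :: t).length / 2) 0 = p
      have hpm : p ∈ x :: t := hP ▸ pv_pivot_mem x t
      rw [pv_sorted_split (x :: t) p]
      set lt := (x :: t).filter (fun v => decide (v < p)) with hlt
      set gt := (x :: t).filter (fun v => decide (p < v)) with hgt
      set A := PySem.List.sorted lt (fun v => v) false with hA
      set C := PySem.List.sorted gt (fun v => v) false with hC
      have hsum : lt.length + (x :: t).count p + gt.length = (x :: t).length :=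
        pv_partition_len (x :: t) p
      have hltlen : lt.length < (x :: t).length :=
        pv_filter_pivot_lt x t hpm (decide_eq_false (lt_irrefl p))
      have hgtlen : gt.length < (x :: t).length :=
        pv_filter_pivot_lt x t hpm (decide_eq_false (lt_irrefl p))
      have hlA : A.length = lt.length := PySem.List.length_sorted _ _ _
      have hlC : C.length = gt.length := PySem.List.length_sorted _ _ _
      by_cases h1 : k < lt.length
      · rw [if_pos h1]
        rw [List.getD_append _ _ _ k (by rw [List.length_append, hlA]; omega)]
        rw [List.getD_append _ _ _ k (by omega)]
        exact ih lt (by omega) k h1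
      · rw [if_neg h1]
        by_cases h2 : k < lt.length + ((x :: t).length - lt.length - gt.length)
        · rw [if_pos h2]
          rw [List.getD_append _ _ _ k
            (by rw [List.length_append, hlA, List.length_replicate]; omega)]
          rw [List.getD_append_right _ _ _ k (by omega)]
          rw [hlA]
          rw [List.getD_eq_getElem _ _ (by rw [List.length_replicate]; omega)]
          rw [List.getElem_replicate]
        · rw [if_neg h2]
          rw [List.getD_append_right _ _ _ k
            (by rw [List.length_append, hlA, List.length_replicate]; omega)]
          have hix : k - (A ++ List.replicate ((x :: t).count p) p).length
              = k - (lt.length + ((x :: t).length - lt.length - gt.length)) := by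
            rw [List.length_append, hlA, List.length_replicate]; omega
          rw [hix]
          exact ih gt (by omega) _ (by omega)

lemma pv_qselect_sorted (d : List Int) (k : Nat) (h : k < d.length) :
    qselect d k = (PySem.List.sorted d (fun v => v) false).getD k 0 :=
  pv_qselect_sorted_aux d.length d le_rfl k h

-- ===== VERDICT (by name: the statement is the Claim_ definition above) =====
theorem safe_median_diff_py_spec : Claim_equal_safe_median_diff_py := by
  intro xs _
  unfold Spec_safe_median_diff_py safe_median_diff_py safe_median_diff_py_alt
  match xs with
  | none => rfl
  | some l =>
    simp only
    by_cases h3 : l.length < 3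
    · simp [h3]
    · simp only [h3, if_false]
      rw [pv_diff_lists l]
      set d := (l.zip (PySem.List.slice l (some 1) none)).map (fun ab => ab.2 - ab.1) with hd
      have hlen : d.length = l.length - 1 := by
        simp [hd, PySem.List.slice_from_one, List.length_zip, List.length_tail]
      have hne : d ≠ [] := by
        intro h; rw [h] at hlen; simp at hlen; omega
      simp only [List.filter_true, if_neg hne]
      have hk : d.length / 2 < d.length := by omega
      have hfd : PySem.Int.floordiv (d.length : Int) 2 = ((d.length / 2 : Nat) : Int) := by
        exact_mod_cast PySem.Int.floordiv_natCast d.length 2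
      rw [hfd, PySem.List.pyGet?_natCast]
      rw [pv_qselect_sorted d (d.length / 2) hk]
      rw [List.getElem?_eq_getElem (by rw [PySem.List.length_sorted]; exact hk)]
      rw [List.getD_eq_getElem _ _ (by rw [PySem.List.length_sorted]; exact hk)]
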